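-- pv_equiv track=rewrite | github.com/ovieimara/datastructures-algorithms | surfaceArea.py | sides
-- ===== SOURCE A (Python) =====
-- def sides(A, col):
--     rows = len(A)
--     total = 0
--
--     for i in range(rows):
--         if i == 0 or i == rows - 1:
--             total += A[i][col]
--
--         if i > 0 or (i == rows - 1 and i > 0):
--             total += abs(A[i-1][col] - A[i][col])
--
--         if i == rows - 1 and i == 0:
--             total += A[i][col]
--
--     return total
-- ===== SOURCE B (Python) =====
-- def sides(A, col):
--     total = 0
--     prev = None
--     for row in A:
--         x = row[col]
--         if prev is None:
--             total = 2 * x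
--         else:
--             total += 2 * max(x - prev, 0)
--         prev = x
--     return total
-- ===== Notes on version B (the rewrite author's own statement) =====
-- stated objective: alternative
-- what changed: B uses the doubled-ascents identity total = 2*(first + sum of max(x - prev, 0)) in one uniform forward pass with a prev accumulator, replacing A's per-index conditionals that add endpoint values plus absolute adjacent differences.
import Mathlib
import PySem

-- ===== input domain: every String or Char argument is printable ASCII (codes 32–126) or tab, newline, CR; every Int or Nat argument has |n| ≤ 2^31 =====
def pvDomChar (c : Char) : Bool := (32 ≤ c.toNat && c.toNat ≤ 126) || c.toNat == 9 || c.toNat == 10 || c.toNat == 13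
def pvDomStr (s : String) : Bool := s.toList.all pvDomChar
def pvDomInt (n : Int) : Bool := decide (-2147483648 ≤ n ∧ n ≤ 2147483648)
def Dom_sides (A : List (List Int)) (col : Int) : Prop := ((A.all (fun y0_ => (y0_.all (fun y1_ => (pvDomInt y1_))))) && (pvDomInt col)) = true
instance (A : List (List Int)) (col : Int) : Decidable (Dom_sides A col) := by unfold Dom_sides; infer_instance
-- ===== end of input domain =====

-- B replaces A's per-index endpoint/abs-difference conditionals by the doubled-ascents identity, one uniform forward pass (alternative decomposition).

-- ===== PORT A =====
def sides (A : List (List Int)) (col : Int) : Int :=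
  let rows : Int := (A.length : Int)
  (PySem.List.pyRange 0 rows 1).foldl (fun total i =>
    let total := if i = 0 ∨ i = rows - 1 then
        total + PySem.List.pyGetD (PySem.List.pyGetD A i []) col 0 else total
    let total := if 0 < i ∨ (i = rows - 1 ∧ 0 < i) then
        total + |PySem.List.pyGetD (PySem.List.pyGetD A (i-1) []) col 0 -
                 PySem.List.pyGetD (PySem.List.pyGetD A i []) col 0| else total
    let total := if i = rows - 1 ∧ i = 0 then
        total + PySem.List.pyGetD (PySem.List.pyGetD A i []) col 0 else total
    total) 0

-- ===== PORT B =====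
-- state (total, prev : Option Int), one forward pass over the rows, as in Source B
def sides_alt (A : List (List Int)) (col : Int) : Int :=
  (A.foldl (fun (st : Int × Option Int) row =>
    let x := PySem.List.pyGetD row col 0
    match st.2 with
    | none => (2 * x, some x)
    | some prev => (st.1 + 2 * max (x - prev) 0, some x)) (0, none)).1

-- ===== PRECONDITION & SPEC =====
-- Pre_ excludes exactly the inputs where Python A raises IndexError: col out of range for some row.
def Pre_sides (A : List (List Int)) (col : Int) : Prop :=
  ∀ row ∈ A, PySem.Raise.InRange row.length col
instance (A : List (List Int)) (col : Int) : Decidable (Pre_sides A col) := by unfold Pre_sides; infer_instance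
def pvWitness_sides : List (List Int) × Int := ([[1], [3], [2]], 0)
def Spec_sides (A : List (List Int)) (col : Int) (out : Int) : Prop := out = sides_alt A col
instance (A : List (List Int)) (col : Int) (out : Int) : Decidable (Spec_sides A col out) := by unfold Spec_sides; infer_instance

-- ===== CLAIM (what is proved, stated in full; the proofs are below) =====
def Claim_equal_sides : Prop := ∀ (A : List (List Int)) (col : Int), Dom_sides A col → Pre_sides A col → Spec_sides A col (sides A col)

-- ===== LEMMAS AND PROOFS =====

-- sum of |adjacent differences| of a list, by structural recursion
def pairSum : List Int → Int
  | a :: b :: t => |a - b| + pairSum (b :: t)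
  | _ => 0

-- doubled positive rises along a list, from a given previous value
def riseSum : Int → List Int → Int
  | _, [] => 0
  | prev, x :: xs => 2 * max (x - prev) 0 + riseSum x xs

-- B's fold over rows equals the fold over the extracted column
lemma fold_rows (rows : List (List Int)) (col : Int) (init : Int × Option Int) :
    rows.foldl (fun (st : Int × Option Int) row =>
      let x := PySem.List.pyGetD row col 0
      match st.2 with
      | none => (2 * x, some x)
      | some prev => (st.1 + 2 * max (x - prev) 0, some x)) init
    = (rows.map (fun row => PySem.List.pyGetD row col 0)).foldl
      (fun (st : Int × Option Int) x =>
      match st.2 with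
      | none => (2 * x, some x)
      | some p => (st.1 + 2 * max (x - p) 0, some x)) init := by
  induction rows generalizing init with
  | nil => rfl
  | cons r rs ih =>
    simp only [List.foldl_cons, List.map_cons]
    exact ih _

-- B's fold, once started, computes riseSum and tracks the last value
lemma fold_riseSum (t : List Int) (prev total : Int) :
    (t.foldl (fun (st : Int × Option Int) x =>
      match st.2 with
      | none => (2 * x, some x)
      | some p => (st.1 + 2 * max (x - p) 0, some x)) (total, some prev))
    = (total + riseSum prev t, some (t.getLastD prev)) := by
  induction t generalizing prev total with
  | nil => simp [riseSum]
  | cons x xs ih =>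
    simp only [List.foldl_cons, List.getLastD_cons]
    rw [ih]
    simp [riseSum]; ring

-- the doubled-ascents identity
lemma rise_eq_pair (t : List Int) (a : Int) :
    2 * a + riseSum a t = a + t.getLastD a + pairSum (a :: t) := by
  induction t generalizing a with
  | nil => simp [riseSum, pairSum]; ring
  | cons x xs ih =>
    simp only [riseSum, List.getLastD_cons, pairSum]
    have hih := ih x
    have hkey : a + 2 * max (x - a) 0 = x + |a - x| := by
      rcases le_total a x with h | h
      · rw [max_eq_left (by omega), abs_of_nonpos (by omega)]; ring
      · rw [max_eq_right (by omega), abs_of_nonneg (by omega)]; ring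
    omega

-- last element of a nonempty list as getD
lemma getD_last (t : List Int) (a : Int) :
    (a :: t).getD ((a :: t).length - 1) 0 = t.getLastD a := by
  induction t generalizing a with
  | nil => rfl
  | cons x xs ih =>
    simp only [List.length_cons, Nat.add_sub_cancel, List.getLastD_cons]
    have := ih x
    simp only [List.length_cons, Nat.add_sub_cancel] at this
    simpa using this

-- sum picking only index 0
lemma first_sum (a : Int) (t : List Int) (f : Nat → Int) (hf : f 0 = a)
    (h0 : ∀ k : Nat, 0 < k → f k = 0) :
    ((List.range (t.length + 1)).map f).sum = a := by
  rw [List.range_succ_eq_map]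
  simp only [List.map_cons, List.map_map, List.sum_cons, Function.comp_def, hf]
  have hz : ((List.range t.length).map (fun k => f (Nat.succ k))).sum = 0 := by
    apply List.sum_eq_zero
    intro y hy
    simp only [List.mem_map, List.mem_range] at hy
    obtain ⟨k, _, rfl⟩ := hy
    exact h0 (Nat.succ k) (by omega)
  rw [hz, add_zero]

-- sum picking only the last index
lemma last_sum (t : List Int) (h : 0 < t.length) (f : Nat → Int)
    (hf : f (t.length - 1) = t.getD (t.length - 1) 0)
    (h0 : ∀ k : Nat, k < t.length - 1 → f k = 0) :
    ((List.range t.length).map f).sum = t.getD (t.length - 1) 0 := by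
  obtain ⟨m, hm⟩ : ∃ m, t.length = m + 1 := ⟨t.length - 1, by omega⟩
  rw [hm, List.range_succ]
  simp only [List.map_append, List.sum_append, List.map_cons, List.map_nil, List.sum_cons,
    List.sum_nil]
  have hz : ((List.range m).map f).sum = 0 := by
    apply List.sum_eq_zero
    intro y hy
    simp only [List.mem_map, List.mem_range] at hy
    obtain ⟨k, hk, rfl⟩ := hy
    exact h0 k (by omega)
  rw [hz]
  have : f m = t.getD (t.length - 1) 0 := by rw [← hf]; congr 1; omega
  rw [this]
  simp only [zero_add, add_zero]
  congr 1
  omega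

-- the adjacent-difference sum over Nat indices equals pairSum
lemma diff_sum (a : Int) (t : List Int) :
    ((List.range t.length).map
      (fun k => |(a :: t).getD k 0 - t.getD k 0|)).sum = pairSum (a :: t) := by
  induction t generalizing a with
  | nil => simp [pairSum]
  | cons b t' ih =>
    rw [List.length_cons, List.range_succ_eq_map]
    simp only [List.map_cons, List.map_map, List.sum_cons, Function.comp_def,
      List.getD_cons_zero, Nat.succ_eq_add_one, List.getD_cons_succ]
    rw [ih b]
    simp [pairSum]

-- ===== VERDICT (by name: the statement is the Claim_ definition above) =====
theorem sides_spec : Claim_equal_sides := by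
  intro A col _ _
  unfold Spec_sides
  cases A with
  | nil => rfl
  | cons r A' =>
  -- names
  set g : List Int → Int := fun row => PySem.List.pyGetD row col 0 with hg
  set c : List Int := (r :: A').map g with hc
  have hclen : c.length = A'.length + 1 := by simp [hc]
  have hcne : c ≠ [] := by simp [hc]
  -- B side
  have hB : sides_alt (r :: A') col
      = c.getD 0 0 + c.getD (c.length - 1) 0 + pairSum c := by
    unfold sides_alt
    rw [fold_rows, ← hg, ← hc]
    obtain ⟨a, t, hct⟩ := List.exists_cons_of_ne_nil hcne
    rw [hct]
    simp only [List.foldl_cons]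
    rw [fold_riseSum]
    simp only
    rw [List.getD_cons_zero, getD_last]
    have := rise_eq_pair t a
    omega
  rw [hB]
  -- A side: turn the fold into a sum over Nat indices
  set n : Nat := (r :: A').length with hn
  set G : Int → Int := fun i => PySem.List.pyGetD (PySem.List.pyGetD (r :: A') i []) col 0 with hG
  have hGk : ∀ k : Nat, k < n → G (k : Int) = c.getD k 0 := by
    intro k hk
    rw [hG]
    simp only [PySem.List.pyGetD_natCast]
    rw [hc]
    have hk' : k < ((r :: A').map g).length := by
      simp only [List.length_map, List.length_cons]
      have := hn ▸ hk
      simpa using this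
    rw [List.getD_eq_getElem _ _ (by simpa using hk'), List.getD_eq_getElem _ _ hk']
    show PySem.List.pyGetD (r :: A')[k] col 0
        = (List.map (fun row => PySem.List.pyGetD row col 0) (r :: A'))[k]
    rw [List.getElem_map]
  have hstep : (fun (total i : Int) =>
      let total := if i = 0 ∨ i = (n : Int) - 1 then total + G i else total
      let total := if 0 < i ∨ (i = (n : Int) - 1 ∧ 0 < i) then total + |G (i-1) - G i| else total
      let total := if i = (n : Int) - 1 ∧ i = 0 then total + G i else total
      total)
      = (fun total i => total +
        ((if i = 0 ∨ i = (n : Int) - 1 then G i else 0)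
         + (if 0 < i ∨ (i = (n : Int) - 1 ∧ 0 < i) then |G (i-1) - G i| else 0)
         + (if i = (n : Int) - 1 ∧ i = 0 then G i else 0))) := by
    funext t i
    dsimp only
    split_ifs <;> ring
  have hA : sides (r :: A') col
      = (PySem.List.pyRange 0 ((n : Nat) : Int) 1).foldl (fun total i =>
        let total := if i = 0 ∨ i = (n : Int) - 1 then total + G i else total
        let total := if 0 < i ∨ (i = (n : Int) - 1 ∧ 0 < i) then total + |G (i-1) - G i| else total
        let total := if i = (n : Int) - 1 ∧ i = 0 then total + G i else total
        total) 0 := rfl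
  rw [hA, hstep, PySem.List.foldl_add, PySem.List.pyRange_zero_natCast n, List.map_map,
    zero_add]
  -- rewrite each summand over Nat index k < n
  rw [List.map_congr_left (l := List.range n)
      (f := (fun i => (if i = 0 ∨ i = (n : Int) - 1 then G i else 0)
         + (if 0 < i ∨ (i = (n : Int) - 1 ∧ 0 < i) then |G (i-1) - G i| else 0)
         + (if i = (n : Int) - 1 ∧ i = 0 then G i else 0)) ∘ (fun k : Nat => (k : Int)))
      (g := fun k : Nat =>
        (if k = 0 ∨ k = n - 1 then c.getD k 0 else 0)
        + (if 0 < k then |c.getD (k - 1) 0 - c.getD k 0| else 0)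
        + (if k = n - 1 ∧ k = 0 then c.getD k 0 else 0))
      (by
        intro k hk
        rw [List.mem_range] at hk
        have hn1 : 1 ≤ n := by rw [hn]; simp
        simp only [Function.comp_apply]
        have e1 : ((k : Int) = 0 ∨ (k : Int) = (n : Int) - 1) ↔ (k = 0 ∨ k = n - 1) := by omega
        have e2 : (0 < (k : Int) ∨ ((k : Int) = (n : Int) - 1 ∧ 0 < (k : Int))) ↔ 0 < k := by omega
        have e3 : ((k : Int) = (n : Int) - 1 ∧ (k : Int) = 0) ↔ (k = n - 1 ∧ k = 0) := by omega
        rw [if_congr e1 rfl rfl, if_congr e2 rfl rfl, if_congr e3 rfl rfl, hGk k hk]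
        by_cases hk0 : 0 < k
        · have : ((k : Int) - 1) = ((k - 1 : Nat) : Int) := by omega
          rw [this, hGk (k - 1) (by omega)]
        · simp [hk0])]
  rw [PySem.List.sum_map_add_int, PySem.List.sum_map_add_int]
  have hnc : n = c.length := by rw [hclen, hn]; simp
  -- second summand: the adjacent differences
  have h2 : ((List.range n).map
      (fun k => if 0 < k then |c.getD (k - 1) 0 - c.getD k 0| else 0)).sum = pairSum c := by
    obtain ⟨a, t', hct⟩ := List.exists_cons_of_ne_nil hcne
    rw [hnc, hct, List.length_cons, List.range_succ_eq_map]
    simp only [List.map_cons, List.map_map, List.sum_cons, Function.comp_def,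
      Nat.succ_eq_add_one, lt_self_iff_false, if_false]
    rw [show (fun k : Nat => if 0 < k + 1 then
          |(a :: t').getD (k + 1 - 1) 0 - (a :: t').getD (k + 1) 0| else 0)
        = (fun k : Nat => |(a :: t').getD k 0 - t'.getD k 0|) from
      funext fun k => by simp]
    rw [diff_sum a t']
    simp
  rw [h2]
  -- first summand: endpoints; third summand: singleton correction
  by_cases hone : n = 1
  · -- single row: c = [a]
    obtain ⟨a, hca⟩ : ∃ a, c = [a] := by
      apply List.length_eq_one_iff.mp
      omega
    rw [hone, hca]
    simp [pairSum, List.range_succ]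
  · have hn2 : 2 ≤ n := by
      have : 1 ≤ n := by rw [hn]; simp
      omega
    have h1 : ((List.range n).map
        (fun k => if k = 0 ∨ k = n - 1 then c.getD k 0 else 0)).sum
        = c.getD 0 0 + c.getD (c.length - 1) 0 := by
      rw [show (fun k : Nat => if k = 0 ∨ k = n - 1 then c.getD k 0 else 0)
          = (fun k : Nat => (if k = 0 then c.getD k 0 else 0)
              + (if k = n - 1 then c.getD k 0 else 0)) from
        funext fun k => by
          by_cases h0 : k = 0 <;> by_cases hl : k = n - 1 <;> simp [h0, hl] <;> omega]
      rw [PySem.List.sum_map_add_int]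
      congr 1
      · obtain ⟨m, hm⟩ : ∃ m, n = m + 1 := ⟨n - 1, by omega⟩
        obtain ⟨t', ht'⟩ : ∃ t' : List Int, t'.length + 1 = n := ⟨c.tail, by
          rw [hnc, List.length_tail]
          have := List.length_pos_of_ne_nil hcne
          omega⟩
        rw [← ht']
        exact first_sum _ t' _ (by simp) (fun k hk => by simp [Nat.pos_iff_ne_zero.mp hk])
      · rw [hnc]
        exact last_sum c (List.length_pos_of_ne_nil hcne) _ (by rw [if_pos rfl])
          (fun k hk => by rw [if_neg (by omega)])
    have h3 : ((List.range n).map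
        (fun k => if k = n - 1 ∧ k = 0 then c.getD k 0 else 0)).sum = 0 := by
      apply List.sum_eq_zero
      intro y hy
      simp only [List.mem_map, List.mem_range] at hy
      obtain ⟨k, _, rfl⟩ := hy
      rw [if_neg (by omega)]
    rw [h1, h3]
    ring
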